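-- pv_equiv track=rewrite | github.com/nishio/atcoder | memo/combination.py | makePowerTable
-- ===== SOURCE A (Python) =====
-- MOD = 10 ** 9 + 7
--
-- K = 10 ** 6
--
-- def makePowerTable(x, K=K, MOD=MOD):
--     """calc x^i for i in [0, K] mod MOD
--     >>> xs = makePowerTable(2, 20, 1000)
--     >>> xs
--     [1, 2, 4, 8, 16, 32, 64, 128, 256, 512, 24, 48, 96, 192, 384, 768, 536, 72, 144, 288, 576]
--     >>> xs == [pow(2, i, 1000) for i in range(21)]
--     True
--
--     %timeit makePowerTable(23)
--     165 ms ± 1.5 ms per loop (mean ± std. dev. of 7 runs, 10 loops each)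
--     166 ms ± 536 µs per loop (mean ± std. dev. of 7 runs, 10 loops each)
--
--     Numba-jit-ed
--     %timeit makePowerTableNumba(23)
--     45 ms ± 546 µs per loop (mean ± std. dev. of 7 runs, 10 loops each)
--     48.7 ms ± 3.12 ms per loop (mean ± std. dev. of 7 runs, 10 loops each)
--     """
--     ret = [1] * (K + 1)
--     cur = 1
--     for i in range(1, K + 1):
--         cur *= x
--         cur %= MOD
--         ret[i] = cur
--     return ret
-- ===== SOURCE B (Python) =====
-- MOD = 10 ** 9 + 7
--
-- K = 10 ** 6
--
-- def makePowerTable(x, K=K, MOD=MOD):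
--     """calc x^i for i in [0, K] mod MOD, each entry via built-in modular exponentiation."""
--     return [pow(x, i, MOD) for i in range(K + 1)]
-- ===== Notes on version B (the rewrite author's own statement) =====
-- stated objective: idiomatic
-- what changed: Replaces the preallocated list mutated by a running-product accumulator with a list comprehension computing each entry independently via built-in three-argument pow (binary exponentiation); Pre_ excludes MOD = 0 with K >= 0, where A raises ZeroDivisionError for K >= 1 and B's pow raises ValueError even at K = 0.
-- intended difference: For K >= 0 with MOD = 1 or MOD < 0, A hard-codes 1 as entry 0 while B returns pow(x, 0, MOD) = 1 % MOD (0 for MOD = 1, a negative residue for MOD < 0), the correct residue of x^0 modulo MOD. — e.g. on makePowerTable(2, 1, -5): A returns [1, -3], B returns [-4, -3]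
-- outside the precondition, e.g. on makePowerTable(2, 0, 0): A returns [1], B raises ValueError
import Mathlib
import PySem

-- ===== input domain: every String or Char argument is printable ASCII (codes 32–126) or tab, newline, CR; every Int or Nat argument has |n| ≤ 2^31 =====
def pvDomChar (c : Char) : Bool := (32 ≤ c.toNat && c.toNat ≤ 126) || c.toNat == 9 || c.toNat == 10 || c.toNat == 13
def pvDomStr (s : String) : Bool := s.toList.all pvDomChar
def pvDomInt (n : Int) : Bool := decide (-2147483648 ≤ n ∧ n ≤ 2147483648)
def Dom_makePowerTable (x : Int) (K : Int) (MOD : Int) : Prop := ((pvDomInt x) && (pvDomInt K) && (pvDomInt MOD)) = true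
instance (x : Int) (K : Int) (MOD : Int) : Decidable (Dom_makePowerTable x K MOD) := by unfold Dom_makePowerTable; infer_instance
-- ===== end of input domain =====

-- B replaces A's mutate-a-preallocated-list running-product loop by a list comprehension whose
-- entries are computed independently with built-in three-argument pow (idiomatic; not faster);
-- for MOD = 1 or MOD < 0 the two differ at entry 0 (stated as D_ below).


-- ===== PORT A =====
-- the loop body of A: cur *= x; cur %= MOD; ret[i] = cur  (state = (ret, cur))
def stepA (x : Int) (MOD : Int) (st : List Int × Int) (i : Int) : List Int × Int :=
  let cur := st.2 * x
  let cur := PySem.Int.mod cur MOD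
  (st.1.set i.toNat cur, cur)

def makePowerTable (x : Int) (K : Int) (MOD : Int) : List Int :=
  let ret := List.replicate (K + 1).toNat 1      -- ret = [1] * (K + 1)
  ((PySem.List.pyRange 1 (K + 1) 1).foldl (stepA x MOD) (ret, 1)).1

-- ===== PORT B =====
-- [pow(x, i, MOD) for i in range(K + 1)]
def makePowerTable_alt (x : Int) (K : Int) (MOD : Int) : List Int :=
  (PySem.List.pyRange 0 (K + 1) 1).map (fun i => PySem.Int.powMod x i.toNat MOD)

-- ===== PRECONDITION & SPEC =====
-- Pre_ excludes MOD = 0 with K ≥ 0: there A raises ZeroDivisionError for K ≥ 1 (cur %= 0), and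
-- B's pow raises ValueError even at K = 0 (where A returns [1]).
def Pre_makePowerTable (x : Int) (K : Int) (MOD : Int) : Prop := ¬ (MOD = 0 ∧ 0 ≤ K)
instance (x : Int) (K : Int) (MOD : Int) : Decidable (Pre_makePowerTable x K MOD) := by unfold Pre_makePowerTable; infer_instance

def pvWitness_makePowerTable : Int × Int × Int := (2, 5, 1000)

-- For K ≥ 0 with MOD = 1 or MOD < 0, A hard-codes 1 as entry 0 while B returns
-- pow(x, 0, MOD) = 1 % MOD (0 for MOD = 1, a negative residue for MOD < 0),
-- the correct residue of x^0 modulo MOD.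
def D_makePowerTable (x : Int) (K : Int) (MOD : Int) : Prop := (MOD < 0 ∨ MOD = 1) ∧ 0 ≤ K
instance (x : Int) (K : Int) (MOD : Int) : Decidable (D_makePowerTable x K MOD) := by unfold D_makePowerTable; infer_instance

def Spec_makePowerTable (x : Int) (K : Int) (MOD : Int) (out : List Int) : Prop := ¬ D_makePowerTable x K MOD → out = makePowerTable_alt x K MOD
instance (x : Int) (K : Int) (MOD : Int) (out : List Int) : Decidable (Spec_makePowerTable x K MOD out) := by unfold Spec_makePowerTable; infer_instance

def pvDiffWitness_makePowerTable : Int × Int × Int := (2, 1, -5)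
def pvDiffWitnessOut_makePowerTable : (List Int) × (List Int) := ([1, -3], [-4, -3])

-- ===== CLAIM =====
def Claim_unchanged_makePowerTable : Prop := ∀ (x : Int) (K : Int) (MOD : Int), Dom_makePowerTable x K MOD → Pre_makePowerTable x K MOD → Spec_makePowerTable x K MOD (makePowerTable x K MOD)
def Claim_changed_makePowerTable : Prop := Dom_makePowerTable (pvDiffWitness_makePowerTable.1) (pvDiffWitness_makePowerTable.2.1) (pvDiffWitness_makePowerTable.2.2) ∧ Pre_makePowerTable (pvDiffWitness_makePowerTable.1) (pvDiffWitness_makePowerTable.2.1) (pvDiffWitness_makePowerTable.2.2) ∧ D_makePowerTable (pvDiffWitness_makePowerTable.1) (pvDiffWitness_makePowerTable.2.1) (pvDiffWitness_makePowerTable.2.2) ∧ makePowerTable (pvDiffWitness_makePowerTable.1) (pvDiffWitness_makePowerTable.2.1) (pvDiffWitness_makePowerTable.2.2) = pvDiffWitnessOut_makePowerTable.1 ∧ makePowerTable_alt (pvDiffWitness_makePowerTable.1) (pvDiffWitness_makePowerTable.2.1) (pvDiffWitness_makePowerTable.2.2) = pvDiffWitnessOut_makePowerTable.2 ∧ pvDiffWitnessOut_makePowerTable.1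 ≠ pvDiffWitnessOut_makePowerTable.2
def Claim_exact_makePowerTable : Prop := ∀ (x : Int) (K : Int) (MOD : Int), Dom_makePowerTable x K MOD → Pre_makePowerTable x K MOD → D_makePowerTable x K MOD → makePowerTable x K MOD ≠ makePowerTable_alt x K MOD

-- ===== LEMMAS AND PROOFS =====

-- Python's `%` (floored mod) may be taken before a multiplication without changing the result.
lemma pymod_mul_left (a b m : Int) :
    PySem.Int.mod (PySem.Int.mod a m * b) m = PySem.Int.mod (a * b) m := by
  simp only [PySem.Int.mod]
  have h : a * b = a.fmod m * b + m * (a.fdiv m * b) := by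
    rw [Int.fmod_def]; ring
  rw [h, Int.add_mul_fmod_self_left]

-- A's fold touches only indices < l.length, so a suffix t rides along untouched.
lemma foldl_stepA_append (x MOD : Int) (is : List Int) :
    ∀ (l t : List Int) (c : Int), (∀ i ∈ is, 0 ≤ i ∧ i.toNat < l.length) →
    is.foldl (stepA x MOD) (l ++ t, c)
      = ((is.foldl (stepA x MOD) (l, c)).1 ++ t, (is.foldl (stepA x MOD) (l, c)).2) := by
  induction is with
  | nil => intro l t c _; simp
  | cons i is ih =>
    intro l t c h
    have hi := h i (List.mem_cons_self)
    simp only [List.foldl_cons, stepA]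
    rw [List.set_append_left _ _ hi.2]
    exact ih _ t _ (by
      intro j hj
      have := h j (List.mem_cons_of_mem _ hj)
      simpa [List.length_set] using this)

-- the running accumulator after processing 1..n
def curAfter (x : Int) (MOD : Int) (n : Nat) : Int :=
  if n = 0 then 1 else PySem.Int.mod (x ^ n) MOD

-- invariant of A's loop: after range(1, n+1) the table is 1 :: [x^i mod MOD for i in 1..n]
lemma fold_inv (x MOD : Int) (n : Nat) :
    (PySem.List.pyRange 1 ((n : Int) + 1) 1).foldl (stepA x MOD) (List.replicate (n + 1) 1, 1)
      = ((1 : Int) :: (PySem.List.pyRange 1 ((n : Int) + 1) 1).map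
            (fun i : Int => PySem.Int.mod (x ^ i.toNat) MOD),
         curAfter x MOD n) := by
  induction n with
  | zero =>
    rw [PySem.List.pyRange_one_eq_nil (by norm_num)]
    simp [curAfter, List.replicate]
  | succ n ih =>
    have hsplit : PySem.List.pyRange 1 ((↑(n + 1) : Int) + 1) 1
        = PySem.List.pyRange 1 ((n : Int) + 1) 1 ++ [(n : Int) + 1] := by
      have := PySem.List.pyRange_one_succ_right (a := 1) (b := (n : Int) + 1) (by omega)
      push_cast
      simpa using this
    have hrep : List.replicate (n + 2) (1 : Int) = List.replicate (n + 1) 1 ++ [1] := by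
      simp [List.replicate_succ' (n := n + 1)]
    rw [hsplit, hrep, List.foldl_append,
        foldl_stepA_append x MOD _ _ _ _ (by
          intro i hi
          rw [PySem.List.mem_pyRange_one] at hi
          constructor
          · omega
          · simp only [List.length_replicate]; omega),
        ih]
    simp only [List.foldl_cons, List.foldl_nil, stepA]
    have hcur : PySem.Int.mod (curAfter x MOD n * x) MOD
        = PySem.Int.mod (x ^ (n + 1)) MOD := by
      unfold curAfter
      by_cases h0 : n = 0
      · simp [h0]
      · rw [if_neg h0, pymod_mul_left, ← pow_succ]
    have hlen : ((1 : Int) :: (PySem.List.pyRange 1 ((n : Int) + 1) 1).map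
        (fun i : Int => PySem.Int.mod (x ^ i.toNat) MOD)).length = n + 1 := by
      simp [PySem.List.length_pyRange_one]
    have hidx : ((n : Int) + 1).toNat = n + 1 := by omega
    rw [hidx]
    have hset : (((1 : Int) :: (PySem.List.pyRange 1 ((n : Int) + 1) 1).map
          (fun i : Int => PySem.Int.mod (x ^ i.toNat) MOD)) ++ [1]).set (n + 1)
          (PySem.Int.mod (curAfter x MOD n * x) MOD)
        = ((1 : Int) :: (PySem.List.pyRange 1 ((n : Int) + 1) 1).map
          (fun i : Int => PySem.Int.mod (x ^ i.toNat) MOD)) ++ [PySem.Int.mod (curAfter x MOD n * x) MOD] := by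
      rw [List.set_append_right _ _ (by rw [hlen])]
      simp [hlen]
    rw [hset, hcur]
    refine Prod.ext ?_ ?_
    · simp [List.map_append, hidx]
    · simp [curAfter]

-- A's result for K ≥ 0, in closed form
lemma makePowerTable_eq_cons (x MOD : Int) (n : Nat) :
    makePowerTable x (n : Int) MOD
      = (1 : Int) :: (PySem.List.pyRange 1 ((n : Int) + 1) 1).map
          (fun i : Int => PySem.Int.mod (x ^ i.toNat) MOD) := by
  have h1 : ((n : Int) + 1).toNat = n + 1 := by omega
  show ((PySem.List.pyRange 1 ((n : Int) + 1) 1).foldl (stepA x MOD)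
      (List.replicate ((n : Int) + 1).toNat 1, 1)).1 = _
  rw [h1, fold_inv]

-- B's result for K ≥ 0, as a head plus the same tail
lemma makePowerTable_alt_eq_cons (x MOD : Int) (n : Nat) :
    makePowerTable_alt x (n : Int) MOD
      = PySem.Int.mod 1 MOD :: (PySem.List.pyRange 1 ((n : Int) + 1) 1).map
          (fun i : Int => PySem.Int.mod (x ^ i.toNat) MOD) := by
  unfold makePowerTable_alt
  rw [PySem.List.pyRange_one_cons (by omega)]
  simp [PySem.Int.powMod]

lemma mod_one_of_two_le (MOD : Int) (h : 2 ≤ MOD) : PySem.Int.mod 1 MOD = 1 := by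
  simp only [PySem.Int.mod]
  rw [Int.fmod_def, Int.fdiv_eq_zero_of_lt (by norm_num) (by omega)]
  ring

lemma mod_one_ne_one (MOD : Int) (h : MOD < 0 ∨ MOD = 1) : PySem.Int.mod 1 MOD ≠ 1 := by
  simp only [PySem.Int.mod]
  rcases h with h | h
  · obtain ⟨k, rfl⟩ : ∃ k : Nat, MOD = Int.negSucc k := ⟨(-MOD - 1).toNat, by omega⟩
    rw [Int.fmod_def]
    have hd : (1:Int).fdiv (Int.negSucc k) = -1 := by simp [Int.fdiv]
    rw [hd]
    omega
  · rw [h, Int.fmod_one]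
    norm_num

-- ===== VERDICT =====
theorem makePowerTable_spec : Claim_unchanged_makePowerTable := by
  intro x K MOD _ hpre hnD
  unfold Pre_makePowerTable at hpre
  unfold D_makePowerTable at hnD
  by_cases hK : K < 0
  · unfold makePowerTable makePowerTable_alt
    rw [PySem.List.pyRange_one_eq_nil (a := 1) (by omega),
        PySem.List.pyRange_one_eq_nil (a := 0) (by omega)]
    simp
    omega
  · obtain ⟨n, rfl⟩ : ∃ n : Nat, K = (n : Int) := ⟨K.toNat, by omega⟩
    have hM : 2 ≤ MOD := by omega
    rw [makePowerTable_eq_cons, makePowerTable_alt_eq_cons, mod_one_of_two_le MOD hM]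

theorem makePowerTable_changed : Claim_changed_makePowerTable := by
  unfold Claim_changed_makePowerTable; decide

theorem makePowerTable_tight : Claim_exact_makePowerTable := by
  intro x K MOD _ _ hD
  obtain ⟨hM, hK⟩ := hD
  obtain ⟨n, rfl⟩ : ∃ n : Nat, K = (n : Int) := ⟨K.toNat, by omega⟩
  rw [makePowerTable_eq_cons, makePowerTable_alt_eq_cons]
  intro h
  exact mod_one_ne_one MOD hM (List.head_eq_of_cons_eq h.symm)
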